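-- pv_equiv track=rewrite | github.com/X-McKay/aida | aida/tools/context.py | _apply_compression
-- ===== SOURCE A (Python) =====
-- from typing import Any, Dict, List, Optional, Union, Callable
--
-- def _apply_compression(scored_content: Dict, target_words: int, priority: str) -> str:
--     """Apply compression based on scores and targets."""
--     # Sort content by score
--     sorted_content = sorted(scored_content.items(), key=lambda x: x[1], reverse=True)
--
--     compressed_parts = []
--     current_words = 0
--
--     for content, score in sorted_content:
--         content_words = len(content.split())
--         if current_words + content_words <= target_words:
--             compressed_parts.append(content)
--             current_words += content_words
--         else:
--             break
--
--     return '. '.join(compressed_parts)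
-- ===== SOURCE B (Python) =====
-- from itertools import accumulate
-- from bisect import bisect_right
--
--
-- def _apply_compression(scored_content, target_words: int, priority: str) -> str:
--     """Prefix-sum table + binary search instead of an incremental scan-and-break."""
--     sorted_content = sorted(scored_content.items(), key=lambda x: x[1], reverse=True)
--     word_counts = [len(content.split()) for content, _ in sorted_content]
--     prefix = list(accumulate(word_counts))
--     cutoff = bisect_right(prefix, target_words)
--     return '. '.join(content for content, _ in sorted_content[:cutoff])
-- ===== Notes on version B (the rewrite author's own statement) =====
-- stated objective: alternative
-- what changed: B replaces A's incremental scan-with-break by materializing the word-count prefix-sum table (itertools.accumulate) and binary-searching it with bisect_right to find the cutoff index, then joining a single slice.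
import Mathlib
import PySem

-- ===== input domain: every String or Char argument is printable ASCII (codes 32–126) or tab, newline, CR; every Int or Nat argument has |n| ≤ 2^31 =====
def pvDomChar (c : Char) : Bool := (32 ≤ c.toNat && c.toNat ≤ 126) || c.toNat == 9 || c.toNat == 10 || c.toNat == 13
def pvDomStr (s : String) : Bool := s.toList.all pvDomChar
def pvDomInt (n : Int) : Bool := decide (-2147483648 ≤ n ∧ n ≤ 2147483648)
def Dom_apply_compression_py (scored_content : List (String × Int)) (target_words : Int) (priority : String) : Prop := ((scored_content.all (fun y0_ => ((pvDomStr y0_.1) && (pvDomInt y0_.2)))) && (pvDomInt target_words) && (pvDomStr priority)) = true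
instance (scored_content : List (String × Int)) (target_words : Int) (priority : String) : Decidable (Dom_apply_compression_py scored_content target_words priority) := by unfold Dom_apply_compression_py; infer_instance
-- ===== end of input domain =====

-- B replaces A's incremental scan-with-break by a prefix-sum table of word counts binary-searched
-- with bisect_right for the cutoff (objective: alternative decomposition, same asymptotic cost).

-- ===== PORT A =====
-- the 'for content, score in sorted_content: … else break' loop of A, state = (compressed_parts, current_words)
def pvLoopA (target_words : Int) : List (String × Int) → List String → Int → List String
  | [], compressed_parts, _ => compressed_parts
  | (content, _) :: rest, compressed_parts, current_words =>
      let content_words : Int := ((PySem.Str.split₀ content).length : Int)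
      if current_words + content_words ≤ target_words then
        pvLoopA target_words rest (compressed_parts ++ [content]) (current_words + content_words)
      else compressed_parts

def apply_compression_py (scored_content : List (String × Int)) (target_words : Int) (priority : String) : String :=
  let sorted_content := PySem.List.sorted scored_content (fun x => x.2) true
  PySem.Str.join ". " (pvLoopA target_words sorted_content [] 0)

-- ===== PORT B =====
-- itertools.accumulate: running prefix sums starting from s
def pvAccum : List Int → Int → List Int
  | [], _ => []
  | x :: xs, s => (s + x) :: pvAccum xs (s + x)

def apply_compression_py_alt (scored_content : List (String × Int)) (target_words : Int) (priority : String) : String :=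
  let sorted_content := PySem.List.sorted scored_content (fun x => x.2) true
  let word_counts := sorted_content.map (fun p => ((PySem.Str.split₀ p.1).length : Int))
  let prefixSums := pvAccum word_counts 0
  let cutoff := PySem.List.bisectRight prefixSums target_words
  PySem.Str.join ". " ((PySem.List.slice sorted_content none (some (cutoff : Int))).map Prod.fst)

-- ===== PRECONDITION & SPEC =====
def Spec_apply_compression_py (scored_content : List (String × Int)) (target_words : Int) (priority : String) (out : String) : Prop := out = apply_compression_py_alt scored_content target_words priority
instance (scored_content : List (String × Int)) (target_words : Int) (priority : String) (out : String) : Decidable (Spec_apply_compression_py scored_content target_words priority out) := by unfold Spec_apply_compression_py; infer_instance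

-- ===== CLAIM (what is proved, stated in full; the proofs are below) =====
def Claim_equal_apply_compression_py : Prop := ∀ (scored_content : List (String × Int)) (target_words : Int) (priority : String), Dom_apply_compression_py scored_content target_words priority → Spec_apply_compression_py scored_content target_words priority (apply_compression_py scored_content target_words priority)

-- ===== LEMMAS AND PROOFS =====

-- the number of items A's loop appends, as a function of the list and the running word total
def pvCut (target_words : Int) : List (String × Int) → Int → Nat
  | [], _ => 0
  | (content, _) :: rest, current_words =>
      let w : Int := ((PySem.Str.split₀ content).length : Int)
      if current_words + w ≤ target_words then pvCut target_words rest (current_words + w) + 1 else 0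

theorem pvLoopA_eq_take (tw : Int) (s : List (String × Int)) (acc : List String) (cur : Int) :
    pvLoopA tw s acc cur = acc ++ (s.take (pvCut tw s cur)).map Prod.fst := by
  induction s generalizing acc cur with
  | nil => simp [pvLoopA, pvCut]
  | cons hd tl ih =>
      obtain ⟨c, sc⟩ := hd
      simp only [pvLoopA, pvCut]
      split_ifs with h
      · rw [ih]; simp
      · simp

theorem pvAccum_length (xs : List Int) (s : Int) : (pvAccum xs s).length = xs.length := by
  induction xs generalizing s with
  | nil => simp [pvAccum]
  | cons x xs ih => simp [pvAccum, ih]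

theorem pvAccum_ge (xs : List Int) (s : Int) (h : ∀ x ∈ xs, 0 ≤ x) :
    ∀ y ∈ pvAccum xs s, s ≤ y := by
  induction xs generalizing s with
  | nil => simp [pvAccum]
  | cons x xs ih =>
      intro y hy
      simp only [pvAccum, List.mem_cons] at hy
      have hx : 0 ≤ x := h x (by simp)
      rcases hy with rfl | hy
      · omega
      · have := ih (s + x) (fun z hz => h z (by simp [hz])) y hy
        omega

theorem pvAccum_pairwise (xs : List Int) (s : Int) (h : ∀ x ∈ xs, 0 ≤ x) :
    (pvAccum xs s).Pairwise (· ≤ ·) := by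
  induction xs generalizing s with
  | nil => simp [pvAccum]
  | cons x xs ih =>
      simp only [pvAccum, List.pairwise_cons]
      refine ⟨pvAccum_ge xs (s + x) (fun z hz => h z (by simp [hz])), ih (s + x) (fun z hz => h z (by simp [hz]))⟩

-- pvCut on the same pre-list characterisation as bisect_right
theorem pvCut_le_length (tw : Int) (s : List (String × Int)) (cur : Int) :
    pvCut tw s cur ≤ s.length := by
  induction s generalizing cur with
  | nil => simp [pvCut]
  | cons hd tl ih =>
      obtain ⟨c, sc⟩ := hd
      simp only [pvCut]
      split_ifs with h
      · simpa using Nat.succ_le_succ (ih _)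
      · simp

theorem pvCut_lt_imp (tw : Int) (s : List (String × Int)) :
    ∀ (cur : Int) (j : Nat), j < pvCut tw s cur →
      (pvAccum (s.map (fun p => ((PySem.Str.split₀ p.1).length : Int))) cur).getD j 0 ≤ tw := by
  induction s with
  | nil => intro cur j hj; simp [pvCut] at hj
  | cons hd tl ih =>
      obtain ⟨c, sc⟩ := hd
      intro cur j hj
      simp only [pvCut] at hj
      split_ifs at hj with h
      · match j with
        | 0 => simpa [pvAccum] using h
        | j + 1 =>
            simp only [List.map_cons, pvAccum, List.getD_cons_succ]
            exact ih _ j (by omega)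
      · omega

theorem pvCut_stop (tw : Int) (s : List (String × Int)) :
    ∀ (cur : Int), pvCut tw s cur < s.length →
      tw < (pvAccum (s.map (fun p => ((PySem.Str.split₀ p.1).length : Int))) cur).getD (pvCut tw s cur) 0 := by
  induction s with
  | nil => intro cur hc; simp at hc
  | cons hd tl ih =>
      obtain ⟨c, sc⟩ := hd
      intro cur hc
      simp only [pvCut, List.map_cons, pvAccum] at hc ⊢
      split_ifs at hc ⊢ with h
      · simp only [List.getD_cons_succ]
        exact ih _ (by simpa using hc)
      · simp only [List.getD_cons_zero]
        omega

-- the bisect index equals the greedy cutoff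
theorem bisect_eq_pvCut (tw : Int) (s : List (String × Int)) :
    PySem.List.bisectRight (pvAccum (s.map (fun p => ((PySem.Str.split₀ p.1).length : Int))) 0) tw
      = pvCut tw s 0 := by
  have hpair : (pvAccum (s.map (fun p => ((PySem.Str.split₀ p.1).length : Int))) 0).Pairwise (· ≤ ·) := by
    refine pvAccum_pairwise _ _ ?_
    intro x hx
    simp at hx
    obtain ⟨a, b, -, rfl⟩ := hx
    positivity
  obtain ⟨hble, hblt, hbgt⟩ := PySem.List.bisectRight_spec _ tw hpair
  have hlen : (pvAccum (s.map (fun p => ((PySem.Str.split₀ p.1).length : Int))) 0).length = s.length := by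
    rw [pvAccum_length, List.length_map]
  have hcle : pvCut tw s 0 ≤ s.length := pvCut_le_length tw s 0
  set B := PySem.List.bisectRight (pvAccum (s.map (fun p => ((PySem.Str.split₀ p.1).length : Int))) 0) tw with hB
  rcases Nat.lt_trichotomy B (pvCut tw s 0) with h | h | h
  · exfalso
    have hjB : B < (pvAccum (s.map (fun p => ((PySem.Str.split₀ p.1).length : Int))) 0).length := by omega
    have h1 := pvCut_lt_imp tw s 0 B h
    have h2 := hbgt B hjB le_rfl
    rw [List.getD_eq_getElem _ _ hjB] at h1
    omega
  · exact h
  · exfalso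
    have hjC : pvCut tw s 0 < (pvAccum (s.map (fun p => ((PySem.Str.split₀ p.1).length : Int))) 0).length := by omega
    have h1 := pvCut_stop tw s 0 (by omega)
    have h2 := hblt (pvCut tw s 0) hjC h
    rw [List.getD_eq_getElem _ _ hjC] at h1
    omega

-- ===== VERDICT (by name: the statement is the Claim_ definition above) =====
theorem apply_compression_py_spec : Claim_equal_apply_compression_py := by
  intro scored_content target_words priority _
  unfold Spec_apply_compression_py apply_compression_py apply_compression_py_alt
  simp only []
  rw [bisect_eq_pvCut, pvLoopA_eq_take, PySem.List.slice_to_natCast]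
  simp
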